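-- pv_equiv track=rewrite | github.com/elinneriksson/advent-of-code | 2020/04/main.py | read_passport
-- ===== SOURCE A (Python) =====
-- def read_passport(lst):
--     passportlist = []
--     _dict = {}
--     for line in lst:
--         if line == []:
--             passportlist.append(_dict)
--             _dict = {}
--
--         else:
--             for i in line:
--                 key, value = i.split(":")
--                 _dict[key] = value
--
--     passportlist.append(_dict)
--
--     return passportlist
-- ===== SOURCE B (Python) =====
-- def read_passport(lst):
--     # pass 1: partition into groups of tokens, one group per blank-line-separated block
--     groups = [[]]
--     for line in lst:
--         if line:
--             groups[-1].extend(line)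
--         else:
--             groups.append([])
--     # pass 2: build one dict per group
--     return [dict(tok.split(":") for tok in group) for group in groups]
-- ===== Notes on version B (the rewrite author's own statement) =====
-- stated objective: alternative
-- what changed: Two separate passes (partition lines into blank-separated token groups, then map each group to a dict built by dict()) replace A's single interleaved accumulate-and-flush loop with a mutable running dict.
import Mathlib
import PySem

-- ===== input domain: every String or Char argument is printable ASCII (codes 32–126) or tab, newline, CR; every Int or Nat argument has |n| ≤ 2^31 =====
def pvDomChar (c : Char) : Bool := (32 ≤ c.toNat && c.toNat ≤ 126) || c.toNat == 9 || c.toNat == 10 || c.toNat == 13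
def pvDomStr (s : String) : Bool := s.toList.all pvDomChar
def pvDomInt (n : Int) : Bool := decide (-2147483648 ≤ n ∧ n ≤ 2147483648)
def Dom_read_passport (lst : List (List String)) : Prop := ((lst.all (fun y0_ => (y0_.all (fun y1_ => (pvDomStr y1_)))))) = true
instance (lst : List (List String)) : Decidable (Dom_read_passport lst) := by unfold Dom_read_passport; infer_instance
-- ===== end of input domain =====

-- B re-implements A's single accumulate-and-flush loop as two passes: partition lines
-- into blank-separated token groups, then map each group to a dict (objective: alternative).


-- ===== PORT A =====
-- key, value = i.split(":"); _dict[key] = value   (any other split arity raises ValueError — excluded by Pre_)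
def pvStepA (d : PySem.Dict String String) (i : String) : PySem.Dict String String :=
  match PySem.Str.split? i ":" with
  | some [key, value] => d.insert key value
  | _ => d

def read_passport (lst : List (List String)) : List (List (String × String)) :=
  let st := lst.foldl
    (fun (st : List (List (String × String)) × PySem.Dict String String) line =>
      if line = [] then (st.1 ++ [st.2.items], PySem.Dict.empty)
      else (st.1, line.foldl pvStepA st.2))
    ([], PySem.Dict.empty)
  st.1 ++ [st.2.items]

-- ===== PORT B =====
-- tok.split(":") as a key/value pair (non-pair arity raises ValueError in dict() — excluded by Pre_)
def pvPair (tok : String) : Option (String × String) :=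
  match PySem.Str.split? tok ":" with
  | some [k, v] => some (k, v)
  | _ => none

-- dict(pairs) = sequential insertion of the pairs into a fresh dict
def pvDictOf (group : List String) : List (String × String) :=
  ((group.filterMap pvPair).foldl (fun d p => d.insert p.1 p.2) PySem.Dict.empty).items

def read_passport_alt (lst : List (List String)) : List (List (String × String)) :=
  let gs := lst.foldl
    (fun (gs : List (List String) × List String) line =>
      if line ≠ [] then (gs.1, gs.2 ++ line) else (gs.1 ++ [gs.2], []))
    ([], [])
  (gs.1 ++ [gs.2]).map pvDictOf

-- ===== PRECONDITION & SPEC =====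
-- Pre_ excludes inputs containing a token without exactly one ':' — there A's tuple
-- unpacking (and B's dict()) raises ValueError.
def Pre_read_passport (lst : List (List String)) : Prop :=
  ∀ line ∈ lst, ∀ s ∈ line, PySem.Str.count s ":" = 1
instance (lst : List (List String)) : Decidable (Pre_read_passport lst) := by
  unfold Pre_read_passport; infer_instance

def pvWitness_read_passport : List (List String) :=
  [["ecl:gry", "pid:860033327"], [], ["byr:1937"], []]

def Spec_read_passport (lst : List (List String)) (out : List (List (String × String))) : Prop := out = read_passport_alt lst
instance (lst : List (List String)) (out : List (List (String × String))) : Decidable (Spec_read_passport lst out) := by unfold Spec_read_passport; infer_instance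

-- ===== CLAIM (what is proved, stated in full; the proofs are below) =====
def Claim_equal_read_passport : Prop := ∀ (lst : List (List String)), Dom_read_passport lst → Pre_read_passport lst → Spec_read_passport lst (read_passport lst)

-- ===== LEMMAS AND PROOFS =====

-- one token: A's inline match = insertion of B's pair (total, no Pre_ needed)
theorem pvStepA_eq_pair (d : PySem.Dict String String) (i : String) :
    pvStepA d i = match pvPair i with
      | some p => d.insert p.1 p.2
      | none => d := by
  unfold pvStepA pvPair
  rcases PySem.Str.split? i ":" with _ | (_ | ⟨k, _ | ⟨v, _ | _⟩⟩) <;> rfl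

-- one group: B's pair-fold = A's token-fold
theorem build_eq (g : List String) (d : PySem.Dict String String) :
    (g.filterMap pvPair).foldl (fun d p => d.insert p.1 p.2) d = g.foldl pvStepA d := by
  induction g generalizing d with
  | nil => rfl
  | cons t ts ih =>
      simp only [List.filterMap_cons, List.foldl_cons, pvStepA_eq_pair]
      cases h : pvPair t <;> simp [List.foldl_cons, ih]

-- the state invariant: A's (passportlist, dict) vs B's (groups, current group)
theorem loop_eq (lst : List (List String)) (gs : List (List String)) (cur : List String) :
    lst.foldl
      (fun (st : List (List (String × String)) × PySem.Dict String String) line =>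
        if line = [] then (st.1 ++ [st.2.items], PySem.Dict.empty)
        else (st.1, line.foldl pvStepA st.2))
      (gs.map pvDictOf, cur.foldl pvStepA PySem.Dict.empty)
    = ((lst.foldl
        (fun (gs : List (List String) × List String) line =>
          if line ≠ [] then (gs.1, gs.2 ++ line) else (gs.1 ++ [gs.2], []))
        (gs, cur)).1.map pvDictOf,
       (lst.foldl
        (fun (gs : List (List String) × List String) line =>
          if line ≠ [] then (gs.1, gs.2 ++ line) else (gs.1 ++ [gs.2], []))
        (gs, cur)).2.foldl pvStepA PySem.Dict.empty) := by
  induction lst generalizing gs cur with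
  | nil => rfl
  | cons line rest ih =>
      simp only [List.foldl_cons]
      by_cases h : line = []
      · subst h
        simpa [pvDictOf, build_eq] using ih (gs ++ [cur]) []
      · simpa [h, List.foldl_append] using ih gs (cur ++ line)

-- ===== VERDICT (by name: the statement is the Claim_ definition above) =====
theorem read_passport_spec : Claim_equal_read_passport := by
  intro lst _ _
  unfold Spec_read_passport read_passport read_passport_alt
  have h := loop_eq lst [] []
  simp only [List.map_nil, List.foldl_nil] at h
  simp [h, pvDictOf, build_eq]
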